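-- pv_equiv track=rewrite | github.com/roymadpis/kafka_tutorial | driver_in_action.py | summarize_by_session
-- ===== SOURCE A (Python) =====
-- def summarize_by_session(packet_list):
--     sessions = {}
--     for p in packet_list:
--         sid = p['session_id']
--         if sid not in sessions:
--             sessions[sid] = {"session_id": sid, "count": 0, "bytes": 0}
--         sessions[sid]["count"] += 1
--         sessions[sid]["bytes"] += p['length']
--     return list(sessions.values())
-- ===== SOURCE B (Python) =====
-- def summarize_by_session(packet_list):
--     ids = list(dict.fromkeys(p['session_id'] for p in packet_list))
--     return [{"session_id": sid,
--              "count": sum(1 for p in packet_list if p['session_id'] == sid),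
--              "bytes": sum(p['length'] for p in packet_list if p['session_id'] == sid)}
--             for sid in ids]
-- ===== Notes on version B (the rewrite author's own statement) =====
-- stated objective: alternative
-- what changed: B keeps no aggregation structure at all: it first extracts the distinct session ids in first-appearance order (dict.fromkeys) and then, for each id, rescans the whole packet list to compute that session's count and byte total, instead of A's single pass that updates running count/bytes totals in a dict of per-session records.
import Mathlib
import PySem

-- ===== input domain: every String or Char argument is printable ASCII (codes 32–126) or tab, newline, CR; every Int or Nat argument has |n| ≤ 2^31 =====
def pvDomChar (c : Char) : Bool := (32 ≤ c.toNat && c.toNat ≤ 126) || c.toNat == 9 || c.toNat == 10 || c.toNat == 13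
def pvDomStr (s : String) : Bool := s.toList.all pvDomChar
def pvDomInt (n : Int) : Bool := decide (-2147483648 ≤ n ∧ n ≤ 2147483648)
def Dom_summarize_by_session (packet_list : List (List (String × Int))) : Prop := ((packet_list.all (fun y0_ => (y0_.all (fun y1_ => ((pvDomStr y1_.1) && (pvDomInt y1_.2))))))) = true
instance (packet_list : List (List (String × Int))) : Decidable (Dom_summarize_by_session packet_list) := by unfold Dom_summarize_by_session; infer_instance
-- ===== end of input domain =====

-- B drops the aggregation dict entirely: it first collects the distinct session ids in
-- first-appearance order and then rescans the packet list per id for count/bytes (alternative decomposition, not faster).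


-- p[k] for a packet dict p; inside Pre_ the key is always present, so the 0 default is never used
def pvGetKey (p : List (String × Int)) (k : String) : Int := (PySem.Dict.mk p).getD k 0

-- ===== PORT A =====
def summarize_by_session (packet_list : List (List (String × Int))) : List (List (String × Int)) :=
  let sessions : PySem.Dict Int (PySem.Dict String Int) :=
    packet_list.foldl (fun sessions p =>
      let sid := pvGetKey p "session_id"
      let sessions :=
        if !sessions.contains sid then
          sessions.insert sid (PySem.Dict.ofList [("session_id", sid), ("count", 0), ("bytes", 0)])
        else sessions
      let sessions := sessions.modify sid PySem.Dict.empty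
        (fun inner => inner.insert "count" (inner.getD "count" 0 + 1))
      sessions.modify sid PySem.Dict.empty
        (fun inner => inner.insert "bytes" (inner.getD "bytes" 0 + pvGetKey p "length")))
      PySem.Dict.empty
  sessions.values.map PySem.Dict.items

-- ===== PORT B =====
def summarize_by_session_alt (packet_list : List (List (String × Int))) : List (List (String × Int)) :=
  let ids : List Int := PySem.List.dedup (packet_list.map (fun p => pvGetKey p "session_id"))
  ids.map (fun sid =>
    [("session_id", sid),
     ("count", ((packet_list.filter (fun p => pvGetKey p "session_id" == sid)).map (fun _ => (1 : Int))).sum),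
     ("bytes", ((packet_list.filter (fun p => pvGetKey p "session_id" == sid)).map (fun p => pvGetKey p "length")).sum)])

-- ===== PRECONDITION & SPEC =====
-- Pre_ excludes exactly the inputs where A raises KeyError: a packet missing 'session_id' or 'length'.
def Pre_summarize_by_session (packet_list : List (List (String × Int))) : Prop :=
  (packet_list.all (fun p => (PySem.Dict.mk p).contains "session_id" && (PySem.Dict.mk p).contains "length")) = true
instance (packet_list : List (List (String × Int))) : Decidable (Pre_summarize_by_session packet_list) := by unfold Pre_summarize_by_session; infer_instance
def pvWitness_summarize_by_session : (List (List (String × Int))) :=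
  [[("session_id", 1), ("length", 10)], [("session_id", 2), ("length", 3)], [("session_id", 1), ("length", 4)]]

def Spec_summarize_by_session (packet_list : List (List (String × Int))) (out : List (List (String × Int))) : Prop := out = summarize_by_session_alt packet_list
instance (packet_list : List (List (String × Int))) (out : List (List (String × Int))) : Decidable (Spec_summarize_by_session packet_list out) := by unfold Spec_summarize_by_session; infer_instance

-- ===== CLAIM (what is proved, stated in full; the proofs are below) =====
def Claim_equal_summarize_by_session : Prop := ∀ (packet_list : List (List (String × Int))), Dom_summarize_by_session packet_list → Pre_summarize_by_session packet_list → Spec_summarize_by_session packet_list (summarize_by_session packet_list)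

-- ===== LEMMAS AND PROOFS =====

-- the summary dict A maintains for a session s whose lengths seen so far are ls
def pvSumm (s : Int) (ls : List Int) : PySem.Dict String Int :=
  PySem.Dict.mk [("session_id", s), ("count", (ls.length : Int)), ("bytes", ls.sum)]

-- the lengths of the packets of l belonging to session s
def pvLens (l : List (List (String × Int))) (s : Int) : List Int :=
  (l.filter (fun p => pvGetKey p "session_id" == s)).map (fun p => pvGetKey p "length")

-- A's loop body as a named function (definitionally the port's fold step)
def pvStepA (sessions : PySem.Dict Int (PySem.Dict String Int)) (p : List (String × Int)) :
    PySem.Dict Int (PySem.Dict String Int) :=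
  let sid := pvGetKey p "session_id"
  let sessions :=
    if !sessions.contains sid then
      sessions.insert sid (PySem.Dict.ofList [("session_id", sid), ("count", 0), ("bytes", 0)])
    else sessions
  let sessions := sessions.modify sid PySem.Dict.empty
    (fun inner => inner.insert "count" (inner.getD "count" 0 + 1))
  sessions.modify sid PySem.Dict.empty
    (fun inner => inner.insert "bytes" (inner.getD "bytes" 0 + pvGetKey p "length"))

lemma pvSumm_snoc (s : Int) (ls : List Int) (v : Int) :
    ((pvSumm s ls).insert "count" ((pvSumm s ls).getD "count" 0 + 1)).insert "bytes"
      ((((pvSumm s ls).insert "count" ((pvSumm s ls).getD "count" 0 + 1))).getD "bytes" 0 + v)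
    = pvSumm s (ls ++ [v]) := by
  apply PySem.Dict.ext
  show ([("session_id", s), ("count", ((ls.length : Int) + 1)), ("bytes", ls.sum + v)] : List (String × Int)) = _
  simp [pvSumm, List.sum_append]

lemma pvStepA_eq (dA : PySem.Dict Int (PySem.Dict String Int)) (p : List (String × Int)) :
    pvStepA dA p =
      (if !dA.contains (pvGetKey p "session_id") then dA.insert (pvGetKey p "session_id") (pvSumm (pvGetKey p "session_id") []) else dA).insert (pvGetKey p "session_id")
        (((((if !dA.contains (pvGetKey p "session_id") then dA.insert (pvGetKey p "session_id") (pvSumm (pvGetKey p "session_id") []) else dA)).getD (pvGetKey p "session_id") PySem.Dict.empty).insert "count"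
            ((((if !dA.contains (pvGetKey p "session_id") then dA.insert (pvGetKey p "session_id") (pvSumm (pvGetKey p "session_id") []) else dA)).getD (pvGetKey p "session_id") PySem.Dict.empty).getD "count" 0 + 1)).insert "bytes"
          (((((if !dA.contains (pvGetKey p "session_id") then dA.insert (pvGetKey p "session_id") (pvSumm (pvGetKey p "session_id") []) else dA)).getD (pvGetKey p "session_id") PySem.Dict.empty).insert "count"
              ((((if !dA.contains (pvGetKey p "session_id") then dA.insert (pvGetKey p "session_id") (pvSumm (pvGetKey p "session_id") []) else dA)).getD (pvGetKey p "session_id") PySem.Dict.empty).getD "count" 0 + 1)).getD "bytes" 0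
            + pvGetKey p "length")) := by
  unfold pvStepA
  have hmod : ∀ (d : PySem.Dict Int (PySem.Dict String Int)) (k : Int) (f : PySem.Dict String Int → PySem.Dict String Int),
      d.modify k PySem.Dict.empty f = d.insert k (f (d.getD k PySem.Dict.empty)) := fun _ _ _ => rfl
  rw [hmod, hmod, PySem.Dict.getD_insert_self, PySem.Dict.insert_insert_self]
  rfl

lemma pvDedup_snoc (xs : List Int) (x : Int) :
    PySem.List.dedup (xs ++ [x]) = if x ∈ xs then PySem.List.dedup xs else PySem.List.dedup xs ++ [x] := by
  simp only [PySem.List.dedup_eq_ofList, PySem.Set.ofList_eq_foldl, List.foldl_append,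
    List.foldl_cons, List.foldl_nil, PySem.Set.add]
  rw [← PySem.Set.ofList_eq_foldl]
  by_cases h : x ∈ xs <;> simp [h, PySem.Set.mem_ofList]

lemma pvSumOnes (xs : List (List (String × Int))) : (xs.map (fun _ => (1 : Int))).sum = (xs.length : Int) := by
  induction xs with
  | nil => rfl
  | cons a t ih => simp; ring

lemma pvLens_snoc (l : List (List (String × Int))) (p : List (String × Int)) (s : Int) :
    pvLens (l ++ [p]) s
      = pvLens l s ++ (if pvGetKey p "session_id" == s then [pvGetKey p "length"] else []) := by
  simp only [pvLens, List.filter_append, List.map_append]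
  congr 1
  by_cases h : pvGetKey p "session_id" == s <;> simp [h]

lemma pvLens_eq_nil (l : List (List (String × Int))) (s : Int)
    (h : s ∉ l.map (fun q => pvGetKey q "session_id")) : pvLens l s = [] := by
  have : l.filter (fun p => pvGetKey p "session_id" == s) = [] := by
    rw [List.filter_eq_nil_iff]
    intro q hq hqs
    exact h (List.mem_map.mpr ⟨q, hq, by simpa using hqs⟩)
  simp [pvLens, this]

-- full characterisation of A's fold from the empty dict
lemma pvItemsA (l : List (List (String × Int))) :
    (l.foldl pvStepA PySem.Dict.empty).items
      = (PySem.List.dedup (l.map (fun p => pvGetKey p "session_id"))).map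
          (fun s => (s, pvSumm s (pvLens l s))) := by
  induction l using List.reverseRecOn with
  | nil => rfl
  | append_singleton l p ih =>
      rw [List.foldl_append, List.foldl_cons, List.foldl_nil, pvStepA_eq]
      set s0 := pvGetKey p "session_id" with hs0
      set v := pvGetKey p "length" with hv
      set dA := l.foldl pvStepA PySem.Dict.empty with hdA
      set sids := l.map (fun q => pvGetKey q "session_id") with hsids
      have hkeys : dA.keys = PySem.List.dedup sids := by
        rw [PySem.Dict.keys, ih, List.map_map]
        exact (List.map_congr_left fun a _ => rfl).trans (List.map_id _)
      have hnd : dA.keys.Nodup := by rw [hkeys]; exact PySem.List.nodup_dedup _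
      by_cases hmem : s0 ∈ sids
      · -- session already present: in-place update of its entry
        have hcont : dA.contains s0 = true := by
          rw [PySem.Dict.contains_eq_decide_mem_keys, hkeys]
          simpa [PySem.List.mem_dedup] using hmem
        have hmemD : s0 ∈ PySem.List.dedup sids := (PySem.List.mem_dedup _ _).mpr hmem
        have hitem : (s0, pvSumm s0 (pvLens l s0)) ∈ dA.items := by
          rw [ih]; exact List.mem_map.mpr ⟨s0, hmemD, rfl⟩
        have hgA : dA.getD s0 PySem.Dict.empty = pvSumm s0 (pvLens l s0) :=
          PySem.Dict.getD_of_mem_items dA hitem hnd PySem.Dict.empty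
        rw [hcont]
        simp only [Bool.not_true, if_neg (by simp : ¬ (false = true))]
        rw [hgA, pvSumm_snoc]
        rw [PySem.Dict.items_insert_of_contains dA _ hcont]
        rw [ih, List.map_map, List.map_append, List.map_cons, List.map_nil, pvDedup_snoc,
          if_pos hmem]
        apply List.map_congr_left
        intro s hsD
        by_cases hse : s = s0
        · subst hse
          simp [pvLens_snoc, ← hs0, ← hv]
        · have : ((s, pvSumm s (pvLens l s)).1 == s0) = false := by
            simpa using hse
          simp only [Function.comp_apply, this, Bool.false_eq_true, if_neg (by simp : ¬ False)]
          rw [pvLens_snoc]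
          have : (pvGetKey p "session_id" == s) = false := by
            simp [← hs0]; exact fun h => hse h.symm
          simp [this]
      · -- new session: appended at the end
        have hcont : dA.contains s0 = false := by
          rw [PySem.Dict.contains_eq_decide_mem_keys, hkeys]
          simpa [PySem.List.mem_dedup] using hmem
        rw [hcont]
        simp only [Bool.not_false, if_true]
        rw [PySem.Dict.getD_insert_self, pvSumm_snoc, PySem.Dict.insert_insert_self]
        rw [PySem.Dict.items_insert_of_not_contains dA _ hcont]
        rw [ih, List.map_append, List.map_cons, List.map_nil, pvDedup_snoc, if_neg hmem,
          List.map_append]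
        congr 1
        · apply List.map_congr_left
          intro s hsD
          have hse : s ≠ s0 := by
            intro h; subst h; exact hmem ((PySem.List.mem_dedup _ _).mp hsD)
          rw [pvLens_snoc]
          have : (pvGetKey p "session_id" == s) = false := by
            simp [← hs0]; exact fun h => hse h.symm
          simp [this]
        · simp only [List.map_cons, List.map_nil]
          rw [pvLens_snoc, pvLens_eq_nil l s0 hmem]
          simp [← hs0, ← hv]

-- ===== VERDICT (by name: the statement is the Claim_ definition above) =====
theorem summarize_by_session_spec : Claim_equal_summarize_by_session := by
  intro packet_list _ _
  unfold Spec_summarize_by_session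
  have hA : summarize_by_session packet_list
      = (packet_list.foldl pvStepA PySem.Dict.empty).values.map PySem.Dict.items := rfl
  rw [hA]
  simp only [PySem.Dict.values, pvItemsA, List.map_map]
  unfold summarize_by_session_alt
  apply List.map_congr_left
  intro s _
  show (pvSumm s (pvLens packet_list s)).items = _
  simp only [pvSumm, pvLens, pvSumOnes, List.length_map]
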